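-- pv_equiv track=rewrite | github.com/seligman/aoc | 2022/Helpers/day_01.py | calc
-- ===== SOURCE A (Python) =====
-- def calc(log, values, mode):
--     batches = [[]]
--     for cur in values:
--         if len(cur) == 0:
--             batches.append([])
--         else:
--             batches[-1].append(int(cur))
--
--     batches = [sum(x) for x in batches]
--
--     if mode == 1:
--         return str(max(batches))
--     else:
--         batches.sort(reverse=True)
--         return str(sum(batches[0:3]))
-- ===== SOURCE B (Python) =====
-- def calc(log, values, mode):
--     # One accumulating pass builds the batch sums directly; max / top-3 are
--     # selected by simple scans instead of max() + a full sort.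
--     sums = []
--     acc = 0
--     for cur in values:
--         if len(cur) == 0:
--             sums.append(acc)
--             acc = 0
--         else:
--             acc += int(cur)
--     sums.append(acc)
--     if mode == 1:
--         best = sums[0]
--         for s in sums[1:]:
--             if best < s:
--                 best = s
--         return str(best)
--     t1 = t2 = t3 = None
--     for s in sums:
--         if t1 is None or t1 < s:
--             t1, t2, t3 = s, t1, t2
--         elif t2 is None or t2 < s:
--             t2, t3 = s, t2
--         elif t3 is None or t3 < s:
--             t3 = s
--     total = t1
--     if t2 is not None:
--         total += t2
--     if t3 is not None:
--         total += t3
--     return str(total)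
-- ===== Notes on version B (the rewrite author's own statement) =====
-- stated objective: alternative
-- what changed: B replaces A's build-list-of-batches / map-sum / max-or-full-sort pipeline by a single accumulating pass that produces batch sums directly, then selects the max (one scan) or the three largest sums (one scan maintaining three slots) instead of sorting the whole list.
-- outside the precondition, e.g. on calc(None, ['12x'], 1): A raises ValueError, B raises ValueError
import Mathlib
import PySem

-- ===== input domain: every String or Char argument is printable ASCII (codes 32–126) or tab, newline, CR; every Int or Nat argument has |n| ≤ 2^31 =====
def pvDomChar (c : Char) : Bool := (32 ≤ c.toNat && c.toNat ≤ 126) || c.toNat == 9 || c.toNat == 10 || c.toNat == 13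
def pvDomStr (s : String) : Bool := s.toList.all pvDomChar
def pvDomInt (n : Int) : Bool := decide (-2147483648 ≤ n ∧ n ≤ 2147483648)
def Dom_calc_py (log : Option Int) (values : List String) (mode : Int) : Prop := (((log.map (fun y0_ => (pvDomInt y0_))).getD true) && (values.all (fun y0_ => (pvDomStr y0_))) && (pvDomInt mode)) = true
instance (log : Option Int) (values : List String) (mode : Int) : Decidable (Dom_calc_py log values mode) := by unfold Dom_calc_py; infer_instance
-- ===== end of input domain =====

-- B replaces A's build-batches-then-sum-then-sort pipeline by one accumulating pass producing
-- the batch sums directly, with max / top-3 picked by simple scans instead of max() + a full sort.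

-- ===== PORT A =====
-- loop body of A's batch-building loop; batches[-1].append(int(cur)) rebuilds the last batch
-- (int(cur) is some on every input Pre_ admits)
def pvStepA (bs : List (List Int)) (cur : String) : List (List Int) :=
  if PySem.Str.len cur == 0 then bs ++ [[]]
  else bs.dropLast ++ [bs.getLast?.getD [] ++ [(PySem.Int.ofStr? cur).getD 0]]

def calc_py (log : Option Int) (values : List String) (mode : Int) : String :=
  let batches := values.foldl pvStepA [[]]
  let sums := batches.map (fun x => x.sum)
  if mode == 1 then
    -- max(batches): the list always contains the initial batch, so max() returns
    PySem.Int.toStr ((PySem.List.max? sums id).getD 0)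
  else
    let sums := PySem.List.sorted sums id true
    PySem.Int.toStr (PySem.List.slice sums (some 0) (some 3)).sum

-- ===== PORT B =====
-- loop body of B's single accumulating pass: state = (running sum, finished batch sums)
def pvStepB (st : Int × List Int) (cur : String) : Int × List Int :=
  if PySem.Str.len cur == 0 then (0, st.2 ++ [st.1])
  else (st.1 + (PySem.Int.ofStr? cur).getD 0, st.2)

-- 's beats slot t' : "t is None or t < s"
def pvGt (s : Int) : Option Int → Bool
  | none => true
  | some v => decide (v < s)

-- loop body of B's top-3 scan
def pvTop3Step (t : Option Int × Option Int × Option Int) (s : Int) :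
    Option Int × Option Int × Option Int :=
  if pvGt s t.1 then (some s, t.1, t.2.1)
  else if pvGt s t.2.1 then (t.1, some s, t.2.1)
  else if pvGt s t.2.2 then (t.1, t.2.1, some s)
  else t

def calc_py_alt (log : Option Int) (values : List String) (mode : Int) : String :=
  let st := values.foldl pvStepB (0, [])
  let sums := st.2 ++ [st.1]
  if mode == 1 then
    PySem.Int.toStr ((sums.drop 1).foldl (fun b s => if b < s then s else b) (sums.headD 0))
  else
    let t := sums.foldl pvTop3Step (none, none, none)
    PySem.Int.toStr (t.1.getD 0 + t.2.1.getD 0 + t.2.2.getD 0)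

-- ===== PRECONDITION & SPEC =====
-- Pre_ excludes exactly the inputs where A raises ValueError: a non-empty line that int() rejects.
def Pre_calc_py (log : Option Int) (values : List String) (mode : Int) : Prop :=
  values.all (fun s => (PySem.Str.len s == 0) || (PySem.Int.ofStr? s).isSome) = true
instance (log : Option Int) (values : List String) (mode : Int) : Decidable (Pre_calc_py log values mode) := by unfold Pre_calc_py; infer_instance

def pvWitness_calc_py : Option Int × List String × Int := (some 0, ["1", "2", "", "3"], 1)

def Spec_calc_py (log : Option Int) (values : List String) (mode : Int) (out : String) : Prop := out = calc_py_alt log values mode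
instance (log : Option Int) (values : List String) (mode : Int) (out : String) : Decidable (Spec_calc_py log values mode out) := by unfold Spec_calc_py; infer_instance

-- ===== CLAIM (what is proved, stated in full; the proofs are below) =====
def Claim_equal_calc_py : Prop := ∀ (log : Option Int) (values : List String) (mode : Int), Dom_calc_py log values mode → Pre_calc_py log values mode → Spec_calc_py log values mode (calc_py log values mode)

-- ===== LEMMAS AND PROOFS =====

-- A's two passes (build batches, then map sum) equal B's single accumulating pass.
lemma pv_sums_eq (vs : List String) (pre : List (List Int)) (last : List Int) :
    (vs.foldl pvStepA (pre ++ [last])).map (fun x => x.sum) =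
      (vs.foldl pvStepB (last.sum, pre.map (fun x => x.sum))).2 ++
        [(vs.foldl pvStepB (last.sum, pre.map (fun x => x.sum))).1] := by
  induction vs generalizing pre last with
  | nil => simp
  | cons c vs ih =>
    simp only [List.foldl_cons, pvStepA, pvStepB]
    by_cases h : (PySem.Str.len c == 0) = true
    · simp only [h, if_true]
      simpa using ih (pre ++ [last]) []
    · simp only [h, List.dropLast_concat, List.getLast?_concat, Option.getD_some]
      simpa using ih pre (last ++ [(PySem.Int.ofStr? c).getD 0])

lemma pv_max_fold (t : List Int) (a : Int) :
    (PySem.List.max? (a :: t) id).getD 0 = t.foldl (fun b s => if b < s then s else b) a := by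
  induction t generalizing a with
  | nil => simp [PySem.List.max?]
  | cons x t ih =>
    have h : PySem.List.max? (a :: x :: t) id = PySem.List.max? ((if a < x then x else a) :: t) id := by
      simp only [PySem.List.max?, List.foldl_cons, id_eq]
      by_cases hax : a < x <;> simp [hax]
    rw [h, ih, List.foldl_cons]

-- Python's max over a non-empty list equals B's scan from the head.
lemma pv_max_eq (l : List Int) (h : l ≠ []) :
    (PySem.List.max? l id).getD 0 =
      (l.drop 1).foldl (fun b s => if b < s then s else b) (l.headD 0) := by
  cases l with
  | nil => exact absurd rfl h
  | cons a t =>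
    simpa using pv_max_fold t a

-- the first three elements of a list, as B's triple of option slots
def pvToT3 : List Int → Option Int × Option Int × Option Int
  | [] => (none, none, none)
  | [a] => (some a, none, none)
  | [a, b] => (some a, some b, none)
  | a :: b :: c :: _ => (some a, some b, some c)

lemma pv_toT3_insertBy (s : Int) (acc : List Int) :
    pvToT3 (PySem.List.insertBy (fun a b => decide (id b < id a)) s acc) =
      pvTop3Step (pvToT3 acc) s := by
  match acc with
  | [] => simp [PySem.List.insertBy, pvToT3, pvTop3Step, pvGt]
  | [a] =>
    by_cases h1 : a < s <;>
      simp [PySem.List.insertBy, pvToT3, pvTop3Step, pvGt, h1]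
  | [a, b] =>
    by_cases h1 : a < s
    · simp [PySem.List.insertBy, pvToT3, pvTop3Step, pvGt, h1]
    · by_cases h2 : b < s <;>
        simp [PySem.List.insertBy, pvToT3, pvTop3Step, pvGt, h1, h2]
  | a :: b :: c :: rest =>
    by_cases h1 : a < s
    · simp [PySem.List.insertBy, pvToT3, pvTop3Step, pvGt, h1]
    · by_cases h2 : b < s
      · simp [PySem.List.insertBy, pvToT3, pvTop3Step, pvGt, h1, h2]
      · by_cases h3 : c < s <;>
          simp [PySem.List.insertBy, pvToT3, pvTop3Step, pvGt, h1, h2, h3]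

lemma pv_toT3_foldl (l : List Int) (acc : List Int) :
    pvToT3 (l.foldl (fun acc x => PySem.List.insertBy (fun a b => decide (id b < id a)) x acc) acc)
      = l.foldl pvTop3Step (pvToT3 acc) := by
  induction l generalizing acc with
  | nil => rfl
  | cons x l ih => simp only [List.foldl_cons, ih, pv_toT3_insertBy]

lemma pv_slice03 (l : List Int) : PySem.List.slice l (some 0) (some 3) = l.take 3 := by
  simp only [PySem.List.slice, PySem.List.clampIdx]
  norm_num
  omega

lemma pv_sum_take3 (l : List Int) :
    (l.take 3).sum =
      (pvToT3 l).1.getD 0 + (pvToT3 l).2.1.getD 0 + (pvToT3 l).2.2.getD 0 := by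
  match l with
  | [] => simp [pvToT3]
  | [a] => simp [pvToT3]
  | [a, b] => simp [pvToT3]
  | a :: b :: c :: rest => simp [pvToT3, List.take_succ_cons]; ring

-- ===== VERDICT (by name: the statement is the Claim_ definition above) =====
theorem calc_py_spec : Claim_equal_calc_py := by
  intro log values mode _ _
  unfold Spec_calc_py calc_py calc_py_alt
  have h1 := pv_sums_eq values [] []
  simp only [List.nil_append, List.map_nil, List.sum_nil] at h1
  simp only [h1]
  by_cases hm : (mode == 1) = true
  · simp only [hm, if_true]
    rw [pv_max_eq _ (by simp)]
  · simp only [hm]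
    rw [PySem.List.sorted_rev_eq_foldl_insertBy, pv_slice03, pv_sum_take3, pv_toT3_foldl]
    rfl
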